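-- pv_equiv track=rewrite | github.com/MarkoZdilar/Graph_Algorithms-Python | Vj4/zdilar_marko_4_1.py | adjacency_list_from_incidence
-- ===== SOURCE A (Python) =====
-- def adjacency_list_from_incidence(incidence_matrix, vertex_labels):
--     num_vertices = len(incidence_matrix)
--     adjacency_list = {label: [] for label in vertex_labels}
--
--     for j in range(len(incidence_matrix[0])):  # Prolazak kroz stupce
--         vertices = []
--         for i in range(num_vertices):  # Prolazak kroz retke
--             if incidence_matrix[i][j] == 1:
--                 vertices.append(vertex_labels[i])
--         if len(vertices) == 2:  # Ako su točno dva vrha povezana bridom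
--             adjacency_list[vertices[0]].append(vertices[1])
--             adjacency_list[vertices[1]].append(vertices[0])
--
--     return adjacency_list
-- ===== SOURCE B (Python) =====
-- def adjacency_list_from_incidence(incidence_matrix, vertex_labels):
--     # Row-major: one pass over the matrix rows builds, per column, the list of
--     # endpoint labels; then one pass over those edge columns fills the adjacency list.
--     ncols = len(incidence_matrix[0])
--     edges = [[] for _ in range(ncols)]
--     for i, row in enumerate(incidence_matrix):
--         edges = [vs + [vertex_labels[i]] if v == 1 else vs
--                  for vs, v in zip(edges, row)]
--     adjacency_list = {label: [] for label in vertex_labels}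
--     for vs in edges:
--         if len(vs) == 2:
--             adjacency_list[vs[0]].append(vs[1])
--             adjacency_list[vs[1]].append(vs[0])
--     return adjacency_list
-- ===== Notes on version B (the rewrite author's own statement) =====
-- stated objective: alternative
-- what changed: Replaces A's column-major nested scans (for each column, re-scan all rows) by a row-major single pass that accumulates per-column endpoint lists into an edge table, then one pass over that table fills the adjacency lists.
import Mathlib
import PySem

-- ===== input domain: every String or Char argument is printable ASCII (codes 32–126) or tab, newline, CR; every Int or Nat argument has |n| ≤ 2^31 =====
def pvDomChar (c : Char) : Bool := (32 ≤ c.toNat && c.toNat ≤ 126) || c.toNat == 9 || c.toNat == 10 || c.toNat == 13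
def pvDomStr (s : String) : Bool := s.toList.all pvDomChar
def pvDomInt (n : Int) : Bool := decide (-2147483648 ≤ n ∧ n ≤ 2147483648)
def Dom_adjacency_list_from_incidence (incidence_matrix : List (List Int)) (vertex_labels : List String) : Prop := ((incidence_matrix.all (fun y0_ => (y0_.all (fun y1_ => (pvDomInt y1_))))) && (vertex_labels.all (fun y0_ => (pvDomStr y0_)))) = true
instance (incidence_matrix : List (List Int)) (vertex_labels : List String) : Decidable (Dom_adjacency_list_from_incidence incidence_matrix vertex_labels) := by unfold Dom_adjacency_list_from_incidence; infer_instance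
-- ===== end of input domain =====

-- B replaces A's column-major nested scans by a row-major pass that accumulates an
-- edge table (per-column endpoint lists), then fills the adjacency lists from it.

-- ===== PORT A =====
-- Column-major: for each column j, re-scan all rows collecting labels of rows with a 1.
-- range(n) is ported as List.range n and the always-nonnegative indexing as getElem?
-- (exact: Python only raises where the option is none, and Pre_ excludes those inputs).
def adjacency_list_from_incidence (incidence_matrix : List (List Int)) (vertex_labels : List String) : List (String × List String) :=
  let num_vertices := incidence_matrix.length
  let adjacency_list : PySem.Dict String (List String) :=
    vertex_labels.foldl (fun d label => d.insert label []) PySem.Dict.empty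
  let ncols := (incidence_matrix[0]?.getD []).length
  let final := (List.range ncols).foldl (fun adj j =>
    let vertices := (List.range num_vertices).foldl (fun vs i =>
      if (incidence_matrix[i]?.getD [])[j]? = some (1 : Int) then
        vs ++ [(vertex_labels[i]?).getD ""]
      else vs) []
    if vertices.length = 2 then
      let v0 := (vertices[0]?).getD ""
      let v1 := (vertices[1]?).getD ""
      (adj.modify v0 [] (· ++ [v1])).modify v1 [] (· ++ [v0])
    else adj) adjacency_list
  final.items

-- ===== PORT B =====
-- Row-major: enumerate(matrix) is ported as zipIdx (indices are the nonnegative 0,1,2,…);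
-- each row updates every column's endpoint list via zip, then one pass over the edge table.
def adjacency_list_from_incidence_alt (incidence_matrix : List (List Int)) (vertex_labels : List String) : List (String × List String) :=
  let ncols := (incidence_matrix[0]?.getD []).length
  let edges : List (List String) :=
    incidence_matrix.zipIdx.foldl (fun es p =>
      (es.zip p.1).map (fun q =>
        if q.2 = (1 : Int) then q.1 ++ [(vertex_labels[p.2]?).getD ""] else q.1))
      (List.replicate ncols [])
  let adjacency_list : PySem.Dict String (List String) :=
    vertex_labels.foldl (fun d label => d.insert label []) PySem.Dict.empty
  (edges.foldl (fun adj vs =>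
    if vs.length = 2 then
      let v0 := (vs[0]?).getD ""
      let v1 := (vs[1]?).getD ""
      (adj.modify v0 [] (· ++ [v1])).modify v1 [] (· ++ [v0])
    else adj) adjacency_list).items

-- ===== PRECONDITION & SPEC =====
-- Pre_ excludes exactly the inputs where Python A raises: an empty matrix (IndexError on
-- incidence_matrix[0]), a row shorter than row 0 (IndexError at incidence_matrix[i][j]),
-- and a 1 in the first ncols entries of a row i with no label (IndexError at vertex_labels[i]).
def Pre_adjacency_list_from_incidence (incidence_matrix : List (List Int)) (vertex_labels : List String) : Prop :=
  incidence_matrix ≠ [] ∧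
  ∀ p ∈ incidence_matrix.zipIdx,
    (incidence_matrix[0]?.getD []).length ≤ p.1.length ∧
    ((∃ v ∈ p.1.take (incidence_matrix[0]?.getD []).length, v = (1 : Int)) →
      p.2 < vertex_labels.length)
instance (incidence_matrix : List (List Int)) (vertex_labels : List String) : Decidable (Pre_adjacency_list_from_incidence incidence_matrix vertex_labels) := by unfold Pre_adjacency_list_from_incidence; infer_instance

def pvWitness_adjacency_list_from_incidence : List (List Int) × List String :=
  ([[1, 0], [1, 1], [0, 1]], ["a", "b", "c"])

def Spec_adjacency_list_from_incidence (incidence_matrix : List (List Int)) (vertex_labels : List String) (out : List (String × List String)) : Prop := out = adjacency_list_from_incidence_alt incidence_matrix vertex_labels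
instance (incidence_matrix : List (List Int)) (vertex_labels : List String) (out : List (String × List String)) : Decidable (Spec_adjacency_list_from_incidence incidence_matrix vertex_labels out) := by unfold Spec_adjacency_list_from_incidence; infer_instance

-- ===== CLAIM (what is proved, stated in full; the proofs are below) =====
def Claim_equal_adjacency_list_from_incidence : Prop := ∀ (incidence_matrix : List (List Int)) (vertex_labels : List String), Dom_adjacency_list_from_incidence incidence_matrix vertex_labels → Pre_adjacency_list_from_incidence incidence_matrix vertex_labels → Spec_adjacency_list_from_incidence incidence_matrix vertex_labels (adjacency_list_from_incidence incidence_matrix vertex_labels)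

-- ===== LEMMAS AND PROOFS =====

-- the per-column list of endpoint labels, as accumulated over (row, index) pairs
def pvColAcc (vertex_labels : List String) (j : Nat) (pairs : List (List Int × Nat)) (acc : List String) : List String :=
  pairs.foldl (fun vs p =>
    if p.1[j]? = some (1 : Int) then vs ++ [(vertex_labels[p.2]?).getD ""] else vs) acc

theorem pvColAcc_append (vertex_labels : List String) (j : Nat) :
    ∀ (pairs : List (List Int × Nat)) (acc : List String),
      pvColAcc vertex_labels j pairs acc = acc ++ pvColAcc vertex_labels j pairs [] := by
  intro pairs
  induction pairs with
  | nil => intro acc; simp [pvColAcc]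
  | cons p ps ih =>
    intro acc
    simp only [pvColAcc, List.foldl_cons] at *
    rw [ih, ih (if p.1[j]? = some 1 then [] ++ [(vertex_labels[p.2]?).getD ""] else [])]
    split_ifs <;> simp

theorem pvZipIdx_foldl_eq_range {α β : Type} (f : β → α → Nat → β) (dflt : α) :
    ∀ (m : List α) (k : Nat) (init : β),
      (m.zipIdx k).foldl (fun b p => f b p.1 p.2) init
        = (List.range m.length).foldl (fun b i => f b (m[i]?.getD dflt) (k + i)) init := by
  intro m
  induction m with
  | nil => intro k init; simp
  | cons a m ih =>
    intro k init
    rw [List.zipIdx_cons, List.foldl_cons, ih,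
      List.length_cons, List.range_succ_eq_map, List.foldl_cons, List.foldl_map]
    simp only [List.getElem?_cons_zero, Option.getD_some, Nat.add_zero,
      List.getElem?_cons_succ, Nat.add_succ, Nat.succ_add]

-- one row step of B's edge-table pass, characterised pointwise
theorem pvRowstep_get (vertex_labels : List String) (es : List (List String))
    (row : List Int) (i : Nat) (hle : es.length ≤ row.length) (j : Nat) (hj : j < es.length) :
    ((es.zip row).map (fun q =>
        if q.2 = (1 : Int) then q.1 ++ [(vertex_labels[i]?).getD ""] else q.1))[j]?
      = some (if row[j]? = some (1 : Int) then es[j] ++ [(vertex_labels[i]?).getD ""] else es[j]) := by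
  have hjr : j < row.length := lt_of_lt_of_le hj hle
  have hjz : j < (es.zip row).length := by simp [List.length_zip]; omega
  rw [List.getElem?_eq_getElem (by simpa using hjz)]
  simp [List.getElem_zip, List.getElem?_eq_getElem hjr]

-- B's whole row pass equals the table of per-column accumulated endpoint lists
theorem pvRowPass (vertex_labels : List String) :
    ∀ (pairs : List (List Int × Nat)) (es : List (List String)),
      (∀ p ∈ pairs, es.length ≤ p.1.length) →
      pairs.foldl (fun es p =>
          (es.zip p.1).map (fun q =>
            if q.2 = (1 : Int) then q.1 ++ [(vertex_labels[p.2]?).getD ""] else q.1)) es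
        = (List.range es.length).map
            (fun j => es[j]?.getD [] ++ pvColAcc vertex_labels j pairs []) := by
  intro pairs
  induction pairs with
  | nil =>
    intro es _
    simp only [List.foldl_nil, pvColAcc, List.append_nil]
    apply List.ext_getElem (by simp)
    intro i h1 h2
    simp [List.getElem?_eq_getElem h1]
  | cons p ps ih =>
    intro es hle
    have hp : es.length ≤ p.1.length := hle p (List.mem_cons_self ..)
    set es' := (es.zip p.1).map (fun q =>
      if q.2 = (1 : Int) then q.1 ++ [(vertex_labels[p.2]?).getD ""] else q.1) with hes'
    have hlen : es'.length = es.length := by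
      simp [hes', List.length_zip]; omega
    rw [List.foldl_cons, ih es' (by intro q hq; rw [hlen]; exact (hle q (List.mem_cons_of_mem _ hq)).trans (le_refl _))]
    rw [hlen]
    apply List.map_congr_left
    intro j hj
    rw [List.mem_range] at hj
    rw [pvRowstep_get vertex_labels es p.1 p.2 hp j hj]
    have : pvColAcc vertex_labels j (p :: ps) []
        = (if p.1[j]? = some (1 : Int) then [(vertex_labels[p.2]?).getD ""] else [])
            ++ pvColAcc vertex_labels j ps [] := by
      have hcons : pvColAcc vertex_labels j (p :: ps) []
          = pvColAcc vertex_labels j ps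
              (if p.1[j]? = some (1 : Int) then [] ++ [(vertex_labels[p.2]?).getD ""] else []) := rfl
      rw [hcons, pvColAcc_append]
      split_ifs <;> simp
    rw [this, List.getElem?_eq_getElem hj]
    split_ifs <;> simp

-- A's inner column scan over row indices equals the accumulated column list
theorem pvVerts_eq (incidence_matrix : List (List Int)) (vertex_labels : List String) (j : Nat) :
    (List.range incidence_matrix.length).foldl (fun vs i =>
        if (incidence_matrix[i]?.getD [])[j]? = some (1 : Int) then
          vs ++ [(vertex_labels[i]?).getD ""]
        else vs) []
      = pvColAcc vertex_labels j incidence_matrix.zipIdx [] := by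
  rw [pvColAcc,
    pvZipIdx_foldl_eq_range
      (f := fun b (row : List Int) i =>
        if row[j]? = some (1 : Int) then b ++ [(vertex_labels[i]?).getD ""] else b)
      (dflt := ([] : List Int)) incidence_matrix 0]
  simp only [Nat.zero_add]

-- ===== VERDICT (by name: the statement is the Claim_ definition above) =====
theorem adjacency_list_from_incidence_spec : Claim_equal_adjacency_list_from_incidence := by
  intro m labels _ hpre
  obtain ⟨hne, hrows⟩ := hpre
  have hedges :
      (m.zipIdx.foldl (fun es p =>
          (es.zip p.1).map (fun q =>
            if q.2 = (1 : Int) then q.1 ++ [(labels[p.2]?).getD ""] else q.1))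
        (List.replicate (m[0]?.getD []).length []))
      = (List.range (m[0]?.getD []).length).map
          (fun j => pvColAcc labels j m.zipIdx []) := by
    rw [pvRowPass labels m.zipIdx (List.replicate (m[0]?.getD []).length [])
      (by intro p hp; simpa using (hrows p hp).1)]
    rw [List.length_replicate]
    apply List.map_congr_left
    intro j hj
    rw [List.mem_range] at hj
    simp [hj]
  have hAinner := pvVerts_eq m labels
  unfold Spec_adjacency_list_from_incidence adjacency_list_from_incidence
    adjacency_list_from_incidence_alt
  simp only []
  rw [hedges, List.foldl_map]
  simp only [hAinner]
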